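-- pv_equiv track=rewrite | github.com/k-harada/AtCoder | ADT/20251023/C.py | solve
-- ===== SOURCE A (Python) =====
-- def solve(n, s_list):
--     ans_list = [1] * (1001)
--     for a in range(1, 350):
--         for b in range(1, 350):
--             s = 4 * a * b + 3 * a + 3 * b
--             if s < 1001:
--                 ans_list[s] = 0
--     res = 0
--     for s in s_list:
--         res += ans_list[s]
--     return res
-- ===== SOURCE B (Python) =====
-- def solve(n, s_list):
--     # No marking sieve: decide each index directly by a divisibility test.
--     # s is expressible as 4*a*b + 3*a + 3*b (a, b >= 1) iff some a >= 1 has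
--     # 7*a + 3 <= s and (4*a + 3) divides (s - 3*a)  (then b = (s-3a)/(4a+3) >= 1).
--     def unmarked(s):
--         a = 1
--         while 7 * a + 3 <= s:
--             if (s - 3 * a) % (4 * a + 3) == 0:
--                 return 0
--             a += 1
--         return 1
--     table = [unmarked(s) for s in range(1001)]
--     return sum(table[s] for s in s_list)
-- ===== Notes on version B (the rewrite author's own statement) =====
-- stated objective: alternative
-- what changed: Replaces A's generative double-loop marking sieve (enumerate all pairs a,b and write 0 at 4ab+3a+3b) by a per-index membership test: each index s is decided directly by trial division (some a>=1 with 7a+3<=s and (4a+3) | (s-3a)), so no marking pass over a mutable array exists at all.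
import Mathlib
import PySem

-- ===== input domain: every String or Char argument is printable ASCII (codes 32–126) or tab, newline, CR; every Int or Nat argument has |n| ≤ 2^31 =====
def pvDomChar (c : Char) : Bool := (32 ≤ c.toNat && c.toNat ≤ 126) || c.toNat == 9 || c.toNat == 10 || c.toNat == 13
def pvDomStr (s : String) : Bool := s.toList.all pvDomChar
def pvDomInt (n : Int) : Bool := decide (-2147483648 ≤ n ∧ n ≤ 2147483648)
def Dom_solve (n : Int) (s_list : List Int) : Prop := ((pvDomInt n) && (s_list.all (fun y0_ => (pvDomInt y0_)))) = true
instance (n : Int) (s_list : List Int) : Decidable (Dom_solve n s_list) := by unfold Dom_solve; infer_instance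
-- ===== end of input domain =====

-- B replaces A's generative double-loop marking sieve by a per-index divisibility
-- (membership) test deciding each table entry directly; same results, similar cost.

-- ===== PORT A =====
-- ans_list after A's two marking loops (a constant: it does not depend on the inputs)
def ansListA : List Int :=
  (PySem.List.pyRange 1 350 1).foldl (fun al a =>
    (PySem.List.pyRange 1 350 1).foldl (fun al b =>
      if 4 * a * b + 3 * a + 3 * b < 1001 then
        PySem.List.pySetD al (4 * a * b + 3 * a + 3 * b) 0
      else al) al)
    (List.replicate 1001 1)

def solve (n : Int) (s_list : List Int) : Int :=
  s_list.foldl (fun res s => res + PySem.List.pyGetD ansListA s 0) 0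

-- ===== PORT B =====
-- the while loop of Source B's `unmarked`: fuel only makes the recursion total
def unmarkedB : Nat → Int → Int → Int
  | 0, _, _ => 1
  | fuel + 1, s, a =>
    if 7 * a + 3 ≤ s then
      if PySem.Int.mod (s - 3 * a) (4 * a + 3) = 0 then 0
      else unmarkedB fuel s (a + 1)
    else 1

-- the comprehension `[unmarked(s) for s in range(1001)]` (143 ≥ the iterations any s < 1001 needs)
def tableB : List Int := (PySem.List.pyRange 0 1001 1).map (fun s => unmarkedB 143 s 1)

def solve_alt (n : Int) (s_list : List Int) : Int :=
  (s_list.map (fun s => PySem.List.pyGetD tableB s 0)).sum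

-- ===== PRECONDITION & SPEC =====
-- Pre_ excludes exactly the inputs where Python A raises IndexError: an s outside [-1001, 1000].
def Pre_solve (n : Int) (s_list : List Int) : Prop := ∀ s ∈ s_list, -1001 ≤ s ∧ s < 1001
instance (n : Int) (s_list : List Int) : Decidable (Pre_solve n s_list) := by unfold Pre_solve; infer_instance
def pvWitness_solve : Int × List Int := (3, [10, -1, 1000, 0])

def Spec_solve (n : Int) (s_list : List Int) (out : Int) : Prop := out = solve_alt n s_list
instance (n : Int) (s_list : List Int) (out : Int) : Decidable (Spec_solve n s_list out) := by unfold Spec_solve; infer_instance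

-- ===== CLAIM (what is proved, stated in full; the proofs are below) =====
def Claim_equal_solve : Prop := ∀ (n : Int) (s_list : List Int), Dom_solve n s_list → Pre_solve n s_list → Spec_solve n s_list (solve n s_list)

-- ===== LEMMAS AND PROOFS =====

theorem getD_set_eq (l : List Int) (nn k : Nat) (v : Int) (hn : nn < l.length) :
    (l.set nn v).getD k 0 = if k = nn then v else l.getD k 0 := by
  rw [List.getD_eq_getElem?_getD, List.getD_eq_getElem?_getD, List.getElem?_set]
  by_cases h : nn = k
  · subst h; simp [hn]
  · simp [h, Ne.symm h]

theorem condFold_spec (g : Int → Int) :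
    ∀ (xs l : List Int), l.length = 1001 → (∀ x ∈ xs, 0 ≤ g x) →
      (xs.foldl (fun al x => if g x < 1001 then PySem.List.pySetD al (g x) 0 else al) l).length = 1001 ∧
      ∀ k : Nat, k < 1001 →
        (xs.foldl (fun al x => if g x < 1001 then PySem.List.pySetD al (g x) 0 else al) l).getD k 0 =
          if ∃ x ∈ xs, g x < 1001 ∧ g x = (k : Int) then 0 else l.getD k 0 := by
  intro xs
  induction xs with
  | nil => intro l hl _; exact ⟨hl, by simp⟩
  | cons x xs ih =>
    intro l hl hpos
    have hx0 : 0 ≤ g x := hpos x (by simp)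
    by_cases hc : g x < 1001
    · have hset : PySem.List.pySetD l (g x) 0 = l.set (g x).toNat 0 :=
        PySem.List.pySetD_of_nonneg l 0 hx0
      have hlen' : (l.set (g x).toNat 0).length = 1001 := by simp [hl]
      obtain ⟨ihlen, ihget⟩ := ih (l.set (g x).toNat 0) hlen' (fun y hy => hpos y (by simp [hy]))
      constructor
      · simpa [List.foldl_cons, hc, hset] using ihlen
      · intro k hk
        rw [List.foldl_cons, if_pos hc, hset, ihget k hk,
            getD_set_eq l (g x).toNat k 0 (by omega)]
        by_cases htail : ∃ y ∈ xs, g y < 1001 ∧ g y = (k : Int)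
        · rw [if_pos htail, if_pos (by obtain ⟨y, hy, h1, h2⟩ := htail; exact ⟨y, by simp [hy], h1, h2⟩)]
        · rw [if_neg htail]
          by_cases hkx : (k : Int) = g x
          · have : k = (g x).toNat := by omega
            rw [if_pos this, if_pos ⟨x, by simp, hc, hkx.symm⟩]
          · have : ¬ k = (g x).toNat := by omega
            rw [if_neg this, if_neg]
            rintro ⟨y, hy, h1, h2⟩
            rcases List.mem_cons.mp hy with rfl | hy'
            · exact hkx h2.symm
            · exact htail ⟨y, hy', h1, h2⟩
    · obtain ⟨ihlen, ihget⟩ := ih l hl (fun y hy => hpos y (by simp [hy]))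
      constructor
      · simpa [List.foldl_cons, hc] using ihlen
      · intro k hk
        rw [List.foldl_cons, if_neg hc, ihget k hk]
        congr 1
        simp only [List.mem_cons, eq_iff_iff]
        constructor
        · rintro ⟨y, hy, h1, h2⟩; exact ⟨y, Or.inr hy, h1, h2⟩
        · rintro ⟨y, rfl | hy, h1, h2⟩
          · exact absurd h1 hc
          · exact ⟨y, hy, h1, h2⟩

theorem outerA_spec :
    ∀ (xs l : List Int), l.length = 1001 → (∀ a ∈ xs, 1 ≤ a) →
      (xs.foldl (fun al a =>
        (PySem.List.pyRange 1 350 1).foldl (fun al b =>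
          if 4 * a * b + 3 * a + 3 * b < 1001 then
            PySem.List.pySetD al (4 * a * b + 3 * a + 3 * b) 0
          else al) al) l).length = 1001 ∧
      ∀ k : Nat, k < 1001 →
        (xs.foldl (fun al a =>
          (PySem.List.pyRange 1 350 1).foldl (fun al b =>
            if 4 * a * b + 3 * a + 3 * b < 1001 then
              PySem.List.pySetD al (4 * a * b + 3 * a + 3 * b) 0
            else al) al) l).getD k 0 =
          if ∃ a ∈ xs, ∃ b ∈ PySem.List.pyRange 1 350 1,
              4 * a * b + 3 * a + 3 * b < 1001 ∧ 4 * a * b + 3 * a + 3 * b = (k : Int) then 0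
          else l.getD k 0 := by
  intro xs
  induction xs with
  | nil => intro l hl _; exact ⟨hl, by simp⟩
  | cons a xs ih =>
    intro l hl hpos
    have ha : 1 ≤ a := hpos a (by simp)
    have hin := condFold_spec (fun b => 4 * a * b + 3 * a + 3 * b) (PySem.List.pyRange 1 350 1) l hl
      (by intro b hb
          have hb1 := (PySem.List.mem_pyRange_one.mp hb).1
          nlinarith)
    obtain ⟨hlen1, hget1⟩ := hin
    obtain ⟨ihlen, ihget⟩ := ih _ hlen1 (fun y hy => hpos y (by simp [hy]))
    refine ⟨by simpa [List.foldl_cons] using ihlen, ?_⟩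
    intro k hk
    rw [List.foldl_cons, ihget k hk, hget1 k hk]
    by_cases htail : ∃ a' ∈ xs, ∃ b ∈ PySem.List.pyRange 1 350 1,
        4 * a' * b + 3 * a' + 3 * b < 1001 ∧ 4 * a' * b + 3 * a' + 3 * b = (k : Int)
    · rw [if_pos htail, if_pos (by obtain ⟨y, hy, hrest⟩ := htail; exact ⟨y, by simp [hy], hrest⟩)]
    · rw [if_neg htail]
      by_cases hhead : ∃ b ∈ PySem.List.pyRange 1 350 1,
          4 * a * b + 3 * a + 3 * b < 1001 ∧ 4 * a * b + 3 * a + 3 * b = (k : Int)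
      · rw [if_pos hhead, if_pos ⟨a, by simp, hhead⟩]
      · rw [if_neg hhead, if_neg]
        rintro ⟨y, hy, hrest⟩
        rcases List.mem_cons.mp hy with rfl | hy'
        · exact hhead hrest
        · exact htail ⟨y, hy', hrest⟩

-- characterisation of Source B's while loop: the loop result is 0/1, and 0 exactly when a divisor exists
theorem unmarkedB_zero_or_one :
    ∀ (fuel : Nat) (s a : Int), unmarkedB fuel s a = 0 ∨ unmarkedB fuel s a = 1 := by
  intro fuel
  induction fuel with
  | zero => intro s a; right; rfl
  | succ fuel ih =>
    intro s a
    simp only [unmarkedB]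
    by_cases hc : 7 * a + 3 ≤ s
    · rw [if_pos hc]
      by_cases hm : PySem.Int.mod (s - 3 * a) (4 * a + 3) = 0
      · rw [if_pos hm]; left; rfl
      · rw [if_neg hm]; exact ih s (a + 1)
    · rw [if_neg hc]; right; rfl

theorem unmarkedB_eq_zero_iff :
    ∀ (fuel : Nat) (s a : Int), 1 ≤ a → s ≤ 7 * (a + fuel) + 2 →
      (unmarkedB fuel s a = 0 ↔
        ∃ a' : Int, a ≤ a' ∧ 7 * a' + 3 ≤ s ∧ (4 * a' + 3) ∣ (s - 3 * a')) := by
  intro fuel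
  induction fuel with
  | zero =>
    intro s a ha hf
    constructor
    · intro h; exact absurd h (by simp [unmarkedB])
    · rintro ⟨a', ha', h7, _⟩; push_cast at hf; omega
  | succ fuel ih =>
    intro s a ha hf
    simp only [unmarkedB]
    by_cases hc : 7 * a + 3 ≤ s
    · rw [if_pos hc]
      by_cases hd : (4 * a + 3) ∣ (s - 3 * a)
      · rw [if_pos ((PySem.Int.mod_eq_zero_iff_dvd _ _).mpr hd)]
        exact ⟨fun _ => ⟨a, le_refl a, hc, hd⟩, fun _ => rfl⟩
      · rw [if_neg (by rw [PySem.Int.mod_eq_zero_iff_dvd]; exact hd)]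
        rw [ih s (a + 1) (by omega) (by push_cast at hf ⊢; omega)]
        constructor
        · rintro ⟨a', h1, h2, h3⟩; exact ⟨a', by omega, h2, h3⟩
        · rintro ⟨a', h1, h2, h3⟩
          refine ⟨a', ?_, h2, h3⟩
          rcases eq_or_lt_of_le h1 with rfl | hlt
          · exact absurd h3 hd
          · omega
    · rw [if_neg hc]
      constructor
      · intro h; exact absurd h one_ne_zero
      · rintro ⟨a', ha', h7, _⟩; omega

-- the two existentials coincide on indices k < 1001
theorem key_iff (k : Nat) (hk : k < 1001) :
    (∃ a ∈ PySem.List.pyRange 1 350 1, ∃ b ∈ PySem.List.pyRange 1 350 1,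
        4 * a * b + 3 * a + 3 * b < 1001 ∧ 4 * a * b + 3 * a + 3 * b = (k : Int))
    ↔ (∃ a' : Int, 1 ≤ a' ∧ 7 * a' + 3 ≤ (k : Int) ∧ (4 * a' + 3) ∣ ((k : Int) - 3 * a')) := by
  constructor
  · rintro ⟨a, ha, b, hb, hlt, heq⟩
    obtain ⟨ha1, _⟩ := PySem.List.mem_pyRange_one.mp ha
    obtain ⟨hb1, _⟩ := PySem.List.mem_pyRange_one.mp hb
    refine ⟨a, ha1, by nlinarith, ⟨b, by linarith⟩⟩
  · rintro ⟨a, ha1, h7, b, hb⟩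
    have hb1 : 1 ≤ b := by nlinarith
    refine ⟨a, PySem.List.mem_pyRange_one.mpr ⟨ha1, by omega⟩, b,
      PySem.List.mem_pyRange_one.mpr ⟨hb1, by nlinarith⟩, by nlinarith, by nlinarith⟩

theorem ext_getD (l1 l2 : List Int) (h : l1.length = l2.length)
    (hg : ∀ k : Nat, k < l1.length → l1.getD k 0 = l2.getD k 0) : l1 = l2 := by
  apply List.ext_getElem h
  intro i h1 h2
  rw [← List.getD_eq_getElem l1 0 h1, ← List.getD_eq_getElem l2 0 h2]
  exact hg i h1

theorem tableB_getD (k : Nat) (hk : k < 1001) :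
    tableB.getD k 0 = unmarkedB 143 (k : Int) 1 := by
  have h := PySem.List.pyGetD_map_pyRange (fun s => unmarkedB 143 s 1) 1001 k 0 hk
  rw [PySem.List.pyGetD_natCast] at h
  simpa [tableB] using h

theorem tableB_length : tableB.length = 1001 := by
  unfold tableB
  rw [List.length_map]
  have := PySem.List.length_pyRange_one (0 : Int) 1001
  simpa using this

theorem arrays_eq : ansListA = tableB := by
  have hA := outerA_spec (PySem.List.pyRange 1 350 1) (List.replicate 1001 1) List.length_replicate
    (fun a ha => (PySem.List.mem_pyRange_one.mp ha).1)
  have hAlen : ansListA.length = 1001 := hA.1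
  have hAget : ∀ k : Nat, k < 1001 →
      ansListA.getD k 0 =
        if ∃ a ∈ PySem.List.pyRange 1 350 1, ∃ b ∈ PySem.List.pyRange 1 350 1,
            4 * a * b + 3 * a + 3 * b < 1001 ∧ 4 * a * b + 3 * a + 3 * b = (k : Int) then 0
        else (List.replicate 1001 (1 : Int)).getD k 0 := hA.2
  apply ext_getD ansListA tableB (by rw [hAlen, tableB_length])
  intro i h1
  have hi : i < 1001 := by omega
  rw [hAget i hi, tableB_getD i hi]
  by_cases h : ∃ a ∈ PySem.List.pyRange 1 350 1, ∃ b ∈ PySem.List.pyRange 1 350 1,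
      4 * a * b + 3 * a + 3 * b < 1001 ∧ 4 * a * b + 3 * a + 3 * b = (i : Int)
  · rw [if_pos h]
    exact ((unmarkedB_eq_zero_iff 143 (i : Int) 1 le_rfl (by push_cast; omega)).mpr
      ((key_iff i hi).mp h)).symm
  · rw [if_neg h]
    have h0 : ¬ unmarkedB 143 (i : Int) 1 = 0 := fun hz =>
      h ((key_iff i hi).mpr
        ((unmarkedB_eq_zero_iff 143 (i : Int) 1 le_rfl (by push_cast; omega)).mp hz))
    rcases unmarkedB_zero_or_one 143 (i : Int) 1 with hz | ho
    · exact absurd hz h0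
    · rw [ho]
      rw [List.getD_eq_getElem?_getD, List.getElem?_replicate, if_pos hi]
      rfl

-- ===== VERDICT (by name: the statement is the Claim_ definition above) =====
theorem solve_spec : Claim_equal_solve := by
  intro n s_list _ _
  unfold Spec_solve solve solve_alt
  rw [PySem.List.foldl_add, arrays_eq, zero_add]
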